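-- pv_equiv track=rewrite | github.com/ssalogel/AoC2024 | src/AoC2020/day24.py | parse_instr
-- ===== SOURCE A (Python) =====
-- def parse_instr(data: list[str]) -> list[list[str]]:
--     res = []
--     for line in data:
--         index = 0
--         instr = []
--         while index < len(line):
--             if line[index] in ("e", "w"):
--                 instr.append(line[index])
--                 index += 1
--             else:
--                 instr.append(line[index : index + 2])
--                 index += 2
--         res.append(instr)
--     return res
-- ===== SOURCE B (Python) =====
-- def parse_instr(data: list[str]) -> list[list[str]]:
--     res = []
--     for line in data:
--         instr = []
--         pending = None
--         for c in line:
--             if pending is not None: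
--                 instr.append(pending + c)
--                 pending = None
--             elif c in ("e", "w"):
--                 instr.append(c)
--             else:
--                 pending = c
--         if pending is not None:
--             instr.append(pending)
--         res.append(instr)
--     return res
-- ===== Notes on version B (the rewrite author's own statement) =====
-- stated objective: alternative
-- what changed: Replaces the index-and-slice while-loop with a single character-level state machine that carries a one-char pending prefix and flushes it at end of line, eliminating all indexing and slicing.
import Mathlib
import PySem

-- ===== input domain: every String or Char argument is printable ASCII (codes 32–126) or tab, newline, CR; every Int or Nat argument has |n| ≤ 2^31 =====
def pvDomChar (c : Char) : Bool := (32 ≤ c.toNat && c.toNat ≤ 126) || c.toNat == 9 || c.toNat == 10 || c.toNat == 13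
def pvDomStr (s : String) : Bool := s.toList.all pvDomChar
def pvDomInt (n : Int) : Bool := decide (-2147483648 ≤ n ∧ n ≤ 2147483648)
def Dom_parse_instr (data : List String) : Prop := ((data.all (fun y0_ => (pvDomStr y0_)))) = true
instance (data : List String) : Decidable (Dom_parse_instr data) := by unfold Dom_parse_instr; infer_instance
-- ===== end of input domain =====

-- B replaces A's index-and-slice while-loop by a pending-prefix state machine folded over the characters (alternative decomposition, same cost).


-- ===== PORT A =====
-- A's while loop: index-based scan; line[index] is always in range (index < len),
-- line[index:index+2] is PySem.List.slice on the char list.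
def parseLineA (cs : List Char) (index : Nat) (instr : List String) : List String :=
  if h : index < cs.length then
    if cs[index] = 'e' ∨ cs[index] = 'w' then
      parseLineA cs (index + 1) (instr ++ [String.ofList [cs[index]]])
    else
      parseLineA cs (index + 2)
        (instr ++ [String.ofList (PySem.List.slice cs (some (index : Int)) (some ((index : Int) + 2)))])
  else instr
termination_by cs.length - index

def parse_instr (data : List String) : List (List String) :=
  data.map (fun line => parseLineA line.toList 0 [])

-- ===== PORT B =====
-- B's state machine: pending prefix carried through a fold, flushed at end of line.
def stepB (st : List String × Option Char) (c : Char) : List String × Option Char :=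
  match st.2 with
  | some p => (st.1 ++ [String.ofList [p, c]], none)
  | none =>
    if c = 'e' ∨ c = 'w' then (st.1 ++ [String.ofList [c]], none)
    else (st.1, some c)

def flushB (st : List String × Option Char) : List String :=
  match st.2 with
  | none => st.1
  | some p => st.1 ++ [String.ofList [p]]

def parse_instr_alt (data : List String) : List (List String) :=
  data.map (fun line => flushB (line.toList.foldl stepB ([], none)))

-- ===== PRECONDITION & SPEC =====
def Spec_parse_instr (data : List String) (out : List (List String)) : Prop := out = parse_instr_alt data
instance (data : List String) (out : List (List String)) : Decidable (Spec_parse_instr data out) := by unfold Spec_parse_instr; infer_instance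

-- ===== CLAIM (what is proved, stated in full; the proofs are below) =====
def Claim_equal_parse_instr : Prop := ∀ (data : List String), Dom_parse_instr data → Spec_parse_instr data (parse_instr data)

-- ===== LEMMAS AND PROOFS =====

-- Common normal form: direct recursion producing the token list of one line.
def tokens : List Char → List String
  | [] => []
  | [c] => [String.ofList [c]]
  | c :: d :: rest =>
    if c = 'e' ∨ c = 'w' then String.ofList [c] :: tokens (d :: rest)
    else String.ofList [c, d] :: tokens rest

theorem parseLineA_eq_tokens (cs : List Char) (index : Nat) (instr : List String) :
    parseLineA cs index instr = instr ++ tokens (cs.drop index) := by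
  induction hn : cs.length - index using Nat.strong_induction_on generalizing index instr with
  | _ n ih =>
  rw [parseLineA]
  by_cases h : index < cs.length
  · simp only [h, dif_pos]
    obtain ⟨c, rest, hdrop⟩ : ∃ c rest, cs.drop index = c :: rest := by
      rcases e : cs.drop index with _ | ⟨c, rest⟩
      · exfalso; have := List.drop_eq_nil_iff.mp e; omega
      · exact ⟨_, _, rfl⟩
    have hc : cs[index] = c := by
      have h0 : 0 < (cs.drop index).length := by simp [hdrop]
      have := List.getElem_drop (xs := cs) (i := index) (j := 0) (h := h0)
      simpa [hdrop] using this.symm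
    have hd1 : cs.drop (index + 1) = rest := by
      have e1 : cs.drop (index + 1) = (cs.drop index).drop 1 := by
        rw [List.drop_drop]
      simp [e1, hdrop]
    by_cases hew : cs[index] = 'e' ∨ cs[index] = 'w'
    · rw [if_pos hew,
        ih (cs.length - (index + 1)) (by omega) (index + 1) _ rfl, hd1]
      have hew' : c = 'e' ∨ c = 'w' := hc ▸ hew
      rcases rest with _ | ⟨d, rest'⟩ <;>
        simp [hdrop, tokens, hc, hew']
    · rw [if_neg hew,
        ih (cs.length - (index + 2)) (by omega) (index + 2) _ rfl]
      have hew' : ¬ (c = 'e' ∨ c = 'w') := fun hco => hew (hc ▸ hco)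
      have hslice : PySem.List.slice cs (some (index : Int)) (some ((index : Int) + 2))
          = (cs.drop index).take 2 := by
        have := PySem.List.slice_natCast_add (xs := cs) (j := index) (n := 2)
        simpa using this
      have hd2 : cs.drop (index + 2) = rest.drop 1 := by
        have e2 : cs.drop (index + 2) = (cs.drop index).drop 2 := by
          rw [List.drop_drop]
        simp [e2, hdrop]
      rcases rest with _ | ⟨d, rest'⟩ <;>
        simp [hdrop, tokens, hew', hslice, hd2, List.take]
  · simp only [h, dif_neg, not_false_iff]
    have : cs.drop index = [] := List.drop_eq_nil_iff.mpr (by omega)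
    simp [this, tokens]

theorem foldB_eq_tokens (cs : List Char) (acc : List String) :
    flushB (cs.foldl stepB (acc, none)) = acc ++ tokens cs := by
  induction hn : cs.length using Nat.strong_induction_on generalizing cs acc with
  | _ n ih =>
  rcases cs with _ | ⟨c, rest⟩
  · simp [flushB, tokens]
  · by_cases hew : c = 'e' ∨ c = 'w'
    · have hstep : stepB (acc, none) c = (acc ++ [String.ofList [c]], none) := by
        simp [stepB, hew]
      simp only [List.foldl_cons, hstep]
      rw [ih rest.length (by simp at hn; omega) rest _ rfl]
      rcases rest with _ | ⟨d, rest'⟩ <;> simp [tokens, hew]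
    · have hstep : stepB (acc, none) c = (acc, some c) := by
        simp [stepB, hew]
      rcases rest with _ | ⟨d, rest'⟩
      · simp [hstep, flushB, tokens]
      · have hstep2 : stepB (acc, some c) d = (acc ++ [String.ofList [c, d]], none) := by
          simp [stepB]
        simp only [List.foldl_cons, hstep, hstep2]
        rw [ih rest'.length (by simp at hn; omega) rest' _ rfl]
        simp [tokens, hew]

-- ===== VERDICT (by name: the statement is the Claim_ definition above) =====
theorem parse_instr_spec : Claim_equal_parse_instr := by
  intro data _
  unfold Spec_parse_instr parse_instr parse_instr_alt
  apply List.map_congr_left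
  intro line _
  rw [parseLineA_eq_tokens, foldB_eq_tokens]
  simp
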